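-- pv_equiv track=rewrite | github.com/TeeKay-FourTwentyOne/math | ramsey-book-graphs/fast_sa_general.py | compute_all_deltas
-- ===== SOURCE A (Python) =====
-- def compute_all_deltas(S_set, m):
--     indicator = [0] * m
--     for x in S_set:
--         indicator[x % m] = 1
--     deltas = [0] * m
--     for d in range(1, m):
--         count = 0
--         for x in range(m):
--             if indicator[x] and indicator[(x - d) % m]:
--                 count += 1
--         deltas[d] = count
--     return deltas
-- ===== SOURCE B (Python) =====
-- def compute_all_deltas(S_set, m):
--     residues = {x % m for x in S_set}
--     deltas = [0] * m
--     for a in residues: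
--         for b in residues:
--             d = (a - b) % m
--             if d:
--                 deltas[d] += 1
--     return deltas
-- ===== Notes on version B (the rewrite author's own statement) =====
-- stated objective: faster
-- what changed: Instead of scanning all m positions of an indicator array for every shift d (O(m^2)), B collects the k distinct residues once and counts one shift per ordered pair of present residues (O(k^2 + m)).
import Mathlib
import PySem

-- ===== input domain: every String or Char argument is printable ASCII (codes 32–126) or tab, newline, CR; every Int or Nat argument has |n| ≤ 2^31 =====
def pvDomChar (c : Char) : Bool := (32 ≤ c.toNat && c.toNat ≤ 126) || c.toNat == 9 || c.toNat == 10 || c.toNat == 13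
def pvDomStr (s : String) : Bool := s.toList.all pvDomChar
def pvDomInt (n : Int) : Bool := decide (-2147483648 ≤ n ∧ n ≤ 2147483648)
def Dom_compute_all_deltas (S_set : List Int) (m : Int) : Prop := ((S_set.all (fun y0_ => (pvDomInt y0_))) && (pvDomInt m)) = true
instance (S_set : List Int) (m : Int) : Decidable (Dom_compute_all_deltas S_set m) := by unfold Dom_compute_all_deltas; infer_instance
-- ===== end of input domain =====

-- B replaces A's per-shift scan of all m positions by one count per ordered pair of distinct
-- residues: asymptotically faster (O(k^2 + m) vs O(m^2), k = number of distinct residues).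

-- ===== PORT A =====
def compute_all_deltas (S_set : List Int) (m : Int) : List Int :=
  let indicator := S_set.foldl
    (fun ind x => PySem.List.pySetD ind (PySem.Int.mod x m) 1)
    (List.replicate m.toNat (0 : Int))
  let deltas := List.replicate m.toNat (0 : Int)
  (PySem.List.pyRange 1 m 1).foldl
    (fun ds d =>
      let count := (PySem.List.pyRange 0 m 1).foldl
        (fun c x =>
          if PySem.List.pyGetD indicator x 0 ≠ 0 ∧
             PySem.List.pyGetD indicator (PySem.Int.mod (x - d) m) 0 ≠ 0
          then c + 1 else c) (0 : Int)
      PySem.List.pySetD ds d count) deltas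

-- ===== PORT B =====
def compute_all_deltas_alt (S_set : List Int) (m : Int) : List Int :=
  let residues : PySem.Set Int := PySem.Set.ofList (S_set.map (fun x => PySem.Int.mod x m))
  let deltas := List.replicate m.toNat (0 : Int)
  residues.foldl
    (fun ds a =>
      residues.foldl
        (fun ds b =>
          let d := PySem.Int.mod (a - b) m
          if d ≠ 0 then PySem.List.pySetD ds d (PySem.List.pyGetD ds d 0 + 1) else ds)
        ds)
    deltas

-- ===== PRECONDITION & SPEC =====
-- Pre_ excludes exactly the inputs on which A raises: m ≤ 0 with a nonempty S_set
-- (IndexError / ZeroDivisionError on 'indicator[x % m]').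
def Pre_compute_all_deltas (S_set : List Int) (m : Int) : Prop := 1 ≤ m ∨ S_set = []
instance (S_set : List Int) (m : Int) : Decidable (Pre_compute_all_deltas S_set m) := by
  unfold Pre_compute_all_deltas; infer_instance
def pvWitness_compute_all_deltas : List Int × Int := ([3, 5, -2, 5], 7)

def Spec_compute_all_deltas (S_set : List Int) (m : Int) (out : List Int) : Prop := out = compute_all_deltas_alt S_set m
instance (S_set : List Int) (m : Int) (out : List Int) : Decidable (Spec_compute_all_deltas S_set m out) := by unfold Spec_compute_all_deltas; infer_instance

-- ===== CLAIM (what is proved, stated in full; the proofs are below) =====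
def Claim_equal_compute_all_deltas : Prop := ∀ (S_set : List Int) (m : Int), Dom_compute_all_deltas S_set m → Pre_compute_all_deltas S_set m → Spec_compute_all_deltas S_set m (compute_all_deltas S_set m)

-- ===== LEMMAS AND PROOFS =====

-- the list of residues of S_set modulo m (with duplicates)
def pvRm (S : List Int) (m : Int) : List Int := S.map (fun x => PySem.Int.mod x m)

-- indicator characterization: after A's first loop, position j holds 1 iff j is a residue
theorem pv_ind_spec (m : Int) (hm : 0 < m) (S : List Int) (ds : List Int)
    (hlen : ds.length = m.toNat) :
    (S.foldl (fun ind x => PySem.List.pySetD ind (PySem.Int.mod x m) 1) ds).length = m.toNat ∧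
    ∀ j : Int, 0 ≤ j → j < m →
      PySem.List.pyGetD (S.foldl (fun ind x => PySem.List.pySetD ind (PySem.Int.mod x m) 1) ds) j 0
        = if j ∈ pvRm S m then 1 else PySem.List.pyGetD ds j 0 := by
  induction S generalizing ds with
  | nil => exact ⟨hlen, fun j _ _ => by simp [pvRm]⟩
  | cons x S ih =>
    have hx0 : 0 ≤ PySem.Int.mod x m := PySem.Int.mod_nonneg x hm
    have hxm : PySem.Int.mod x m < m := PySem.Int.mod_lt x hm
    have hlen' : (PySem.List.pySetD ds (PySem.Int.mod x m) 1).length = m.toNat := by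
      rw [PySem.List.length_pySetD, hlen]
    obtain ⟨ihl, ihg⟩ := ih (PySem.List.pySetD ds (PySem.Int.mod x m) 1) hlen'
    refine ⟨by simpa using ihl, fun j hj0 hjm => ?_⟩
    rw [List.foldl_cons, ihg j hj0 hjm]
    have hset : PySem.List.pyGetD (PySem.List.pySetD ds (PySem.Int.mod x m) 1) j 0
        = if j = PySem.Int.mod x m then 1 else PySem.List.pyGetD ds j 0 := by
      have e1 : PySem.Int.mod x m = (((PySem.Int.mod x m).toNat : Nat) : Int) := by omega
      have e2 : j = ((j.toNat : Nat) : Int) := by omega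
      rw [e1, e2, PySem.List.pyGetD_pySetD_natCast ds _ _ 1 0 (by omega)]
      split_ifs with h1 h2 h2
      · rfl
      · omega
      · omega
      · rw [← e2]
    by_cases hmem : j ∈ pvRm S m
    · simp [pvRm, List.mem_cons] at hmem ⊢
      simp [hmem]
    · rw [if_neg hmem, hset]
      have hcons : j ∈ pvRm (x :: S) m ↔ (j = PySem.Int.mod x m ∨ j ∈ pvRm S m) := by
        simp [pvRm]
      by_cases hj : j = PySem.Int.mod x m
      · have hmx : j ∈ pvRm (x :: S) m := hcons.2 (Or.inl hj)
        rw [if_pos hj, if_pos hmx]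
      · simp only [hcons]
        simp [hj, hmem]

-- fold that sets distinct in-range indices
theorem pv_setfold (f : Int → Int) (L : List Int) (hnd : L.Nodup) :
    ∀ (ds : List Int), (∀ d ∈ L, 0 ≤ d ∧ d < (ds.length : Int)) →
    (L.foldl (fun ds d => PySem.List.pySetD ds d (f d)) ds).length = ds.length ∧
    ∀ j : Nat, j < ds.length →
      (L.foldl (fun ds d => PySem.List.pySetD ds d (f d)) ds).getD j 0
        = if (j : Int) ∈ L then f j else ds.getD j 0 := by
  induction L with
  | nil => exact fun ds _ => ⟨rfl, fun j _ => by simp⟩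
  | cons d L ih =>
    intro ds hb
    have hd := hb d List.mem_cons_self
    have hb' : ∀ e ∈ L, 0 ≤ e ∧ e < ((PySem.List.pySetD ds d (f d)).length : Int) := by
      intro e he
      rw [PySem.List.length_pySetD]
      exact hb e (List.mem_cons_of_mem _ he)
    have hnd' : d ∉ L ∧ L.Nodup := by simpa using hnd
    obtain ⟨ihl, ihg⟩ := ih hnd'.2 (PySem.List.pySetD ds d (f d)) hb'
    rw [PySem.List.length_pySetD] at ihl
    refine ⟨by simpa using ihl, fun j hj => ?_⟩
    have hjlen : j < (PySem.List.pySetD ds d (f d)).length := by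
      rw [PySem.List.length_pySetD]; exact hj
    rw [List.foldl_cons, ihg j hjlen]
    have hset : (PySem.List.pySetD ds d (f d)).getD j 0
        = if (j : Int) = d then f d else ds.getD j 0 := by
      have hdlen : d.toNat < ds.length := by omega
      rw [PySem.List.pySetD_of_nonneg ds (f d) hd.1]
      rw [List.getD_eq_getElem?_getD, List.getElem?_set, List.getD_eq_getElem?_getD]
      by_cases h1 : d.toNat = j
      · rw [if_pos h1, if_pos hdlen, if_pos (by omega : (j : Int) = d)]; rfl
      · rw [if_neg h1, if_neg (by omega : ¬ (j : Int) = d)]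
    by_cases hmem : (j : Int) ∈ L
    · simp [hmem, List.mem_cons]
    · rw [if_neg hmem, hset]
      by_cases hjd : (j : Int) = d
      · simp [hjd]
      · simp [List.mem_cons, hjd, hmem]

-- fold that increments at in-range indices, skipping index 0
theorem pv_incrfold (key : Int × Int → Int) :
    ∀ (P : List (Int × Int)) (ds : List Int), (∀ p ∈ P, 0 ≤ key p ∧ key p < (ds.length : Int)) →
    (P.foldl (fun ds p => if key p ≠ 0 then
        PySem.List.pySetD ds (key p) (PySem.List.pyGetD ds (key p) 0 + 1) else ds) ds).length
      = ds.length ∧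
    ∀ j : Nat, j < ds.length →
      (P.foldl (fun ds p => if key p ≠ 0 then
          PySem.List.pySetD ds (key p) (PySem.List.pyGetD ds (key p) 0 + 1) else ds) ds).getD j 0
        = ds.getD j 0 + (if j = 0 then 0 else (P.countP (fun p => decide (key p = (j : Int))) : Int)) := by
  intro P
  induction P with
  | nil => exact fun ds _ => ⟨rfl, fun j _ => by simp⟩
  | cons p P ih =>
    intro ds hb
    have hp := hb p List.mem_cons_self
    by_cases hk : key p = 0
    · simp only [List.foldl_cons, if_neg (not_not_intro hk)]
      obtain ⟨ihl, ihg⟩ := ih ds (fun q hq => hb q (List.mem_cons_of_mem _ hq))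
      refine ⟨ihl, fun j hj => ?_⟩
      rw [ihg j hj, List.countP_cons]
      by_cases hj0 : j = 0
      · simp [hj0]
      · have : ¬ (key p = (j : Int)) := by omega
        simp [this, hj0]
    · rw [List.foldl_cons, if_pos hk]
      set ds' := PySem.List.pySetD ds (key p) (PySem.List.pyGetD ds (key p) 0 + 1) with hds'
      have hlen' : ds'.length = ds.length := PySem.List.length_pySetD _ _ _
      obtain ⟨ihl, ihg⟩ := ih ds' (fun q hq => by
        rw [hlen']; exact hb q (List.mem_cons_of_mem _ hq))
      rw [hlen'] at ihl
      refine ⟨ihl, fun j hj => ?_⟩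
      rw [ihg j (by rw [hlen']; exact hj), List.countP_cons]
      have hset : ds'.getD j 0 = if (j : Int) = key p then ds.getD j 0 + 1 else ds.getD j 0 := by
        have hklen : (key p).toNat < ds.length := by omega
        rw [hds', PySem.List.pySetD_of_nonneg ds _ hp.1,
          PySem.List.pyGetD_of_nonneg ds 0 hp.1]
        rw [List.getD_eq_getElem?_getD, List.getElem?_set, List.getD_eq_getElem?_getD,
          List.getD_eq_getElem?_getD]
        by_cases h1 : (key p).toNat = j
        · rw [if_pos h1, if_pos hklen, if_pos (by omega : (j : Int) = key p)]
          have : (key p).toNat = j := h1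
          simp [this]
        · rw [if_neg h1, if_neg (by omega : ¬ (j : Int) = key p)]
      rw [hset]
      by_cases hj0 : j = 0
      · simp [hj0]
        omega
      · by_cases hjk : (j : Int) = key p
        · have : key p = (j : Int) := hjk.symm
          simp only [this]
          simp [hj0]
          ring
        · have : ¬ (key p = (j : Int)) := fun h => hjk h.symm
          simp [this, hjk, hj0]

-- a nested fold over two lists is a fold over the list of pairs
theorem pv_nested_to_flat {α : Type} (h : List α → Int → Int → List α) (ys : List Int) :
    ∀ (xs : List Int) (ds : List α),
    xs.foldl (fun ds a => ys.foldl (fun ds b => h ds a b) ds) ds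
      = (xs.flatMap (fun a => ys.map (fun b => (a, b)))).foldl (fun ds p => h ds p.1 p.2) ds := by
  intro xs
  induction xs with
  | nil => intro ds; rfl
  | cons a xs ih =>
    intro ds
    simp only [List.foldl_cons, List.flatMap_cons, List.foldl_append, List.foldl_map, ih]

-- counting over a superlist restricted to membership in a nodup sublist
theorem pv_count_sub (L1 L2 : List Int) (q : Int → Bool) (h1 : L1.Nodup) (h2 : L2.Nodup)
    (hsub : ∀ x ∈ L2, x ∈ L1) :
    L1.countP (fun x => decide (x ∈ L2) && q x) = L2.countP q := by
  rw [List.countP_eq_length_filter, List.countP_eq_length_filter]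
  apply List.Perm.length_eq
  apply (List.perm_ext_iff_of_nodup (h1.filter _) (h2.filter _)).2
  intro x
  simp only [List.mem_filter, Bool.and_eq_true, decide_eq_true_eq]
  constructor
  · rintro ⟨_, hx2, hq⟩; exact ⟨hx2, hq⟩
  · rintro ⟨hx2, hq⟩; exact ⟨hsub x hx2, hx2, hq⟩

-- for residues in [0, m), the pair (a, b) has difference d iff b = (a - d) % m
theorem pv_shift_unique (m a b d : Int) (hm : 0 < m) (hb0 : 0 ≤ b) (hbm : b < m)
    (hd0 : 0 ≤ d) (hdm : d < m) :
    PySem.Int.mod (a - b) m = d ↔ b = PySem.Int.mod (a - d) m := by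
  rw [PySem.Int.mod_eq_emod_of_pos hm, PySem.Int.mod_eq_emod_of_pos hm]
  constructor
  · intro h
    subst h
    rw [Int.sub_emod a ((a - b) % m) m, Int.emod_emod_of_dvd _ dvd_rfl, ← Int.sub_emod]
    have h2 : a - (a - b) = b := by ring
    rw [h2, Int.emod_eq_of_lt hb0 hbm]
  · intro h
    subst h
    rw [Int.sub_emod a ((a - d) % m) m, Int.emod_emod_of_dvd _ dvd_rfl, ← Int.sub_emod]
    have : (a - (a - d)) = d := by ring
    rw [this, Int.emod_eq_of_lt hd0 hdm]

-- counting matching pairs = counting first components whose partner is present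
theorem pv_pairs_count (m d : Int) (hm : 0 < m) (hd0 : 0 ≤ d) (hdm : d < m)
    (R : List Int) (hnd : R.Nodup) (hR : ∀ a ∈ R, 0 ≤ a ∧ a < m) :
    ∀ xs : List Int,
    (xs.flatMap (fun a => R.map (fun b => (a, b)))).countP
        (fun p => decide (PySem.Int.mod (p.1 - p.2) m = d))
      = xs.countP (fun a => decide (PySem.Int.mod (a - d) m ∈ R)) := by
  intro xs
  induction xs with
  | nil => simp
  | cons a xs ih =>
    have hmap : (R.map (fun b => (a, b))).countP
          (fun p => decide (PySem.Int.mod (p.1 - p.2) m = d))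
        = if PySem.Int.mod (a - d) m ∈ R then 1 else 0 := by
      rw [List.countP_map]
      have hcong : ∀ b ∈ R,
          ((fun p : Int × Int => decide (PySem.Int.mod (p.1 - p.2) m = d)) ∘
            (fun b => (a, b))) b = (b == PySem.Int.mod (a - d) m) := by
        intro b hb
        show decide (PySem.Int.mod (a - b) m = d) = (b == PySem.Int.mod (a - d) m)
        have h := pv_shift_unique m a b d hm (hR b hb).1 (hR b hb).2 hd0 hdm
        by_cases hbe : b = PySem.Int.mod (a - d) m
        · subst hbe; simp [h.mpr rfl]
        · simp [hbe, h]
      rw [List.countP_congr (fun b hb => by rw [hcong b hb])]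
      by_cases hmem : PySem.Int.mod (a - d) m ∈ R
      · simpa [hmem, List.count_eq_countP] using List.count_eq_one_of_mem hnd hmem
      · simpa [hmem, List.count_eq_countP] using List.count_eq_zero_of_not_mem hmem
    rw [List.flatMap_cons, List.countP_append, List.countP_cons, hmap, ih]
    by_cases hmem : PySem.Int.mod (a - d) m ∈ R <;> simp [hmem, Nat.add_comm]

-- the two counts agree: A's scan over all positions for shift d = B's pair count for shift d
theorem pv_bridge (S : List Int) (m d : Int) (hm : 0 < m) (hd1 : 1 ≤ d) (hdm : d < m) :
    (PySem.List.pyRange 0 m 1).countP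
        (fun x => decide (x ∈ pvRm S m) && decide (PySem.Int.mod (x - d) m ∈ pvRm S m))
      = ((PySem.Set.ofList (pvRm S m)).flatMap
          (fun a => (PySem.Set.ofList (pvRm S m)).map (fun b => (a, b)))).countP
          (fun p => decide (PySem.Int.mod (p.1 - p.2) m = d)) := by
  have hRsub : ∀ a ∈ PySem.Set.ofList (pvRm S m), 0 ≤ a ∧ a < m := by
    intro a ha
    rw [PySem.Set.mem_ofList] at ha
    simp only [pvRm, List.mem_map] at ha
    obtain ⟨x, _, rfl⟩ := ha
    exact ⟨PySem.Int.mod_nonneg x hm, PySem.Int.mod_lt x hm⟩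
  rw [pv_pairs_count m d hm (by omega) hdm _ (PySem.Set.nodup_ofList _) hRsub]
  rw [← pv_count_sub (PySem.List.pyRange 0 m 1) (PySem.Set.ofList (pvRm S m))
    (fun a => decide (PySem.Int.mod (a - d) m ∈ PySem.Set.ofList (pvRm S m)))
    (PySem.List.nodup_pyRange_one 0 m) (PySem.Set.nodup_ofList _)
    (fun x hx => PySem.List.mem_pyRange_one.mpr ⟨(hRsub x hx).1, (hRsub x hx).2⟩)]
  apply List.countP_congr
  intro x _
  simp [PySem.Set.mem_ofList]

theorem compute_all_deltas_spec : Claim_equal_compute_all_deltas := by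
  intro S m _ hpre
  unfold Spec_compute_all_deltas
  by_cases hm : 0 < m
  case neg =>
    have hS : S = [] := by
      rcases hpre with h | h
      · omega
      · exact h
    subst hS
    have hn : m.toNat = 0 := by omega
    simp [compute_all_deltas, compute_all_deltas_alt, hn, PySem.List.pyRange_one,
      show (m - 1).toNat = 0 from by omega, PySem.Set.ofList]
  case pos =>
    have hmn : ((m.toNat : Nat) : Int) = m := Int.toNat_of_nonneg (by omega)
    -- indicator characterization
    obtain ⟨hIlen, hIget⟩ := pv_ind_spec m hm S (List.replicate m.toNat 0) (by simp)
    have hIget' : ∀ j : Int, 0 ≤ j → j < m →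
        PySem.List.pyGetD
          (S.foldl (fun ind x => PySem.List.pySetD ind (PySem.Int.mod x m) 1)
            (List.replicate m.toNat (0 : Int))) j 0
          = if j ∈ pvRm S m then 1 else 0 := by
      intro j h0 hj
      refine (hIget j h0 hj).trans ?_
      by_cases hmem : j ∈ pvRm S m
      · rw [if_pos hmem, if_pos hmem]
      · rw [if_neg hmem, if_neg hmem, PySem.List.pyGetD_of_nonneg _ _ h0,
          List.getD_eq_getElem?_getD, List.getElem?_replicate]
        split_ifs <;> rfl
    -- A as a set-fold over the shifts
    obtain ⟨hAlen, hAget⟩ := pv_setfold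
      (fun d => (PySem.List.pyRange 0 m 1).foldl
        (fun c x => if PySem.List.pyGetD
              (S.foldl (fun ind x => PySem.List.pySetD ind (PySem.Int.mod x m) 1)
                (List.replicate m.toNat (0 : Int))) x 0 ≠ 0 ∧
            PySem.List.pyGetD
              (S.foldl (fun ind x => PySem.List.pySetD ind (PySem.Int.mod x m) 1)
                (List.replicate m.toNat (0 : Int))) (PySem.Int.mod (x - d) m) 0 ≠ 0
          then c + 1 else c) 0)
      (PySem.List.pyRange 1 m 1) (PySem.List.nodup_pyRange_one 1 m)
      (List.replicate m.toNat 0)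
      (fun d hd => by
        have := PySem.List.mem_pyRange_one.mp hd
        simp only [List.length_replicate]
        omega)
    -- B as a flat fold over the pairs
    have hB : compute_all_deltas_alt S m
        = ((PySem.Set.ofList (pvRm S m)).flatMap
            (fun a => (PySem.Set.ofList (pvRm S m)).map (fun b => (a, b)))).foldl
            (fun ds p => if PySem.Int.mod (p.1 - p.2) m ≠ 0 then
                PySem.List.pySetD ds (PySem.Int.mod (p.1 - p.2) m)
                  (PySem.List.pyGetD ds (PySem.Int.mod (p.1 - p.2) m) 0 + 1) else ds)
            (List.replicate m.toNat 0) := by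
      rw [show compute_all_deltas_alt S m
          = (PySem.Set.ofList (pvRm S m)).foldl
              (fun ds a => (PySem.Set.ofList (pvRm S m)).foldl
                (fun ds b => if PySem.Int.mod (a - b) m ≠ 0 then
                    PySem.List.pySetD ds (PySem.Int.mod (a - b) m)
                      (PySem.List.pyGetD ds (PySem.Int.mod (a - b) m) 0 + 1) else ds) ds)
              (List.replicate m.toNat 0) from rfl]
      exact pv_nested_to_flat _ _ _ _
    obtain ⟨hBlen, hBget⟩ := pv_incrfold (fun p => PySem.Int.mod (p.1 - p.2) m)
      ((PySem.Set.ofList (pvRm S m)).flatMap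
        (fun a => (PySem.Set.ofList (pvRm S m)).map (fun b => (a, b))))
      (List.replicate m.toNat 0)
      (fun p _ => by
        simp only [List.length_replicate]
        constructor
        · exact PySem.Int.mod_nonneg _ hm
        · rw [hmn]; exact PySem.Int.mod_lt _ hm)
    rw [hB, show compute_all_deltas S m
        = (PySem.List.pyRange 1 m 1).foldl
            (fun ds d => PySem.List.pySetD ds d ((PySem.List.pyRange 0 m 1).foldl
              (fun c x => if PySem.List.pyGetD
                    (S.foldl (fun ind x => PySem.List.pySetD ind (PySem.Int.mod x m) 1)
                      (List.replicate m.toNat (0 : Int))) x 0 ≠ 0 ∧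
                  PySem.List.pyGetD
                    (S.foldl (fun ind x => PySem.List.pySetD ind (PySem.Int.mod x m) 1)
                      (List.replicate m.toNat (0 : Int))) (PySem.Int.mod (x - d) m) 0 ≠ 0
                then c + 1 else c) 0))
            (List.replicate m.toNat (0 : Int)) from rfl]
    apply List.ext_getElem
    · rw [hAlen, hBlen]
    · intro i h1 h2
      have hi : i < m.toNat := by
        have h1x := h1
        rw [hAlen, List.length_replicate] at h1x
        exact h1x
      rw [← List.getD_eq_getElem _ 0 h1, ← List.getD_eq_getElem _ 0 h2,
        hAget i (by simpa using hi), hBget i (by simpa using hi)]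
      have hrep : (List.replicate m.toNat (0 : Int)).getD i 0 = 0 := by
        rw [List.getD_eq_getElem?_getD, List.getElem?_replicate]
        split_ifs
        all_goals rfl
      rw [hrep]
      by_cases hi0 : i = 0
      · subst hi0
        rw [if_neg (by
          intro hmem
          have := PySem.List.mem_pyRange_one.mp hmem
          omega), if_pos rfl]
        ring
      · have hd1 : (1 : Int) ≤ (i : Int) := by omega
        have hdm : ((i : Int)) < m := by omega
        rw [if_pos (PySem.List.mem_pyRange_one.mpr ⟨hd1, hdm⟩), if_neg hi0]
        rw [PySem.List.foldl_ite_add_one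
          (fun x => PySem.List.pyGetD
              (S.foldl (fun ind x => PySem.List.pySetD ind (PySem.Int.mod x m) 1)
                (List.replicate m.toNat (0 : Int))) x 0 ≠ 0 ∧
            PySem.List.pyGetD
              (S.foldl (fun ind x => PySem.List.pySetD ind (PySem.Int.mod x m) 1)
                (List.replicate m.toNat (0 : Int))) (PySem.Int.mod (x - (i : Int)) m) 0 ≠ 0)
          (PySem.List.pyRange 0 m 1) 0]
        -- reduce A's counted predicate to membership, then apply the bridge
        congr 1
        refine congrArg Nat.cast
          (Eq.trans (List.countP_congr ?_) (pv_bridge S m (i : Int) hm hd1 hdm))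
        intro x hx
        have hxb := PySem.List.mem_pyRange_one.mp hx
        simp only [decide_eq_true_eq, Bool.and_eq_true]
        rw [hIget' x hxb.1 hxb.2,
          hIget' (PySem.Int.mod (x - (i : Int)) m) (PySem.Int.mod_nonneg _ hm)
            (PySem.Int.mod_lt _ hm)]
        by_cases h1 : x ∈ pvRm S m
        all_goals by_cases h2 : PySem.Int.mod (x - (i : Int)) m ∈ pvRm S m
        all_goals simp [h1, h2]
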